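-- pv_equiv track=rewrite | github.com/vaibhav-jain-dev/learning-algo | problems/200-must-solve/arrays/03-tournament-winner/similar/02-tournament-tiebreakers/python_code.py | tournament_winner_with_tiebreakers
-- ===== SOURCE A (Python) =====
-- from typing import List, Dict
-- from collections import defaultdict
--
-- def tournament_winner_with_tiebreakers(
--     competitions: List[List[str]], results: List[int]
-- ) -> str:
--     """Find winner using head-to-head tiebreaker."""
--     stats: Dict[str, Dict] = defaultdict(lambda: {"points": 0, "head_to_head": defaultdict(int)})
--
--     # Process all competitions
--     for (home, away), result in zip(competitions, results):
--         winner = home if result == 1 else away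
--         loser = away if result == 1 else home
--
--         stats[winner]["points"] += 3
--         stats[winner]["head_to_head"][loser] += 1
--         _ = stats[loser]  # Ensure loser exists
--
--     # Find teams with max points
--     max_points = max(s["points"] for s in stats.values())
--     tied_teams = [team for team, s in stats.items() if s["points"] == max_points]
--
--     if len(tied_teams) == 1:
--         return tied_teams[0]
--
--     # Head-to-head tiebreaker among tied teams
--     tied_set = set(tied_teams)
--     head_to_head_wins = {}
--
--     for team in tied_teams:
--         wins = sum(
--             stats[team]["head_to_head"][opp]
--             for opp in stats[team]["head_to_head"]
--             if opp in tied_set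
--         )
--         head_to_head_wins[team] = wins
--
--     # Return team with best head-to-head record
--     return max(tied_teams, key=lambda t: head_to_head_wins[t])
-- ===== SOURCE B (Python) =====
-- def tournament_winner_with_tiebreakers(competitions, results):
--     """Find winner using head-to-head tiebreaker (flat points pass + rescan)."""
--     points = {}
--     for (home, away), result in zip(competitions, results):
--         winner = home if result == 1 else away
--         loser = away if result == 1 else home
--         points[winner] = points.get(winner, 0) + 3
--         points.setdefault(loser, 0)
--
--     max_points = max(points.values())
--     tied_teams = [team for team, p in points.items() if p == max_points]
--
--     if len(tied_teams) == 1: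
--         return tied_teams[0]
--
--     # Second pass: count head-to-head wins among tied teams directly.
--     tied_set = set(tied_teams)
--     head_to_head_wins = {team: 0 for team in tied_teams}
--     for (home, away), result in zip(competitions, results):
--         winner = home if result == 1 else away
--         loser = away if result == 1 else home
--         if winner in tied_set and loser in tied_set:
--             head_to_head_wins[winner] += 1
--
--     return max(tied_teams, key=lambda t: head_to_head_wins[t])
-- ===== Notes on version B (the rewrite author's own statement) =====
-- stated objective: simpler
-- what changed: B drops A's eagerly-built nested per-team head_to_head dict: it accumulates only flat points per team in the first pass, then rescans the competitions once to count head-to-head wins among the tied teams.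
import Mathlib
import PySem

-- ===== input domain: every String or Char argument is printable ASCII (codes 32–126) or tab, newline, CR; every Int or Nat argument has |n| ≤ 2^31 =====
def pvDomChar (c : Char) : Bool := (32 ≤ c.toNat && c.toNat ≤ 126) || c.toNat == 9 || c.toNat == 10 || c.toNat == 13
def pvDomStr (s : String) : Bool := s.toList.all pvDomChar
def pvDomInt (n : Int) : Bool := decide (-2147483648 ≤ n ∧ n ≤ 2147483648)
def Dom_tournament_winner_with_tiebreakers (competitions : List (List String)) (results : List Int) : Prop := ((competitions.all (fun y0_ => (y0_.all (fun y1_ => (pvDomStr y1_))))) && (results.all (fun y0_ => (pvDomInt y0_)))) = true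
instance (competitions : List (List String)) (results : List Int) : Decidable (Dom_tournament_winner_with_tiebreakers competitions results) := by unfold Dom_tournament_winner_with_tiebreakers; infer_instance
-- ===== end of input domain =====

-- B replaces A's nested per-team head-to-head dict by a flat points pass plus a second
-- rescan of the competitions counting head-to-head wins among the tied teams (objective: simpler).

-- ===== PORT A =====
-- helper: the per-competition update of A's stats dict (points + nested head_to_head dict, loser ensured)
def pvStepA (stats : PySem.Dict String (Int × PySem.Dict String Int)) (pr : List String × Int) :
    PySem.Dict String (Int × PySem.Dict String Int) :=
  let home := pr.1.getD 0 ""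
  let away := pr.1.getD 1 ""
  let winner := if pr.2 == 1 then home else away
  let loser := if pr.2 == 1 then away else home
  let e := stats.getD winner (0, PySem.Dict.empty)
  let stats' := stats.insert winner (e.1 + 3, e.2.modify loser 0 (· + 1))
  if stats'.contains loser then stats' else stats'.insert loser (0, PySem.Dict.empty)

-- helper: 'wins = sum(... for opp in stats[team]["head_to_head"] if opp in tied_set)'
def pvWins (stats : PySem.Dict String (Int × PySem.Dict String Int)) (tiedSet : List String)
    (team : String) : Int :=
  (((stats.getD team (0, PySem.Dict.empty)).2.items.filter
      (fun q => PySem.Set.contains tiedSet q.1)).map (fun q => q.2)).sum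

def tournament_winner_with_tiebreakers (competitions : List (List String)) (results : List Int) : String :=
  let stats := (competitions.zip results).foldl pvStepA PySem.Dict.empty
  match PySem.List.max? (stats.values.map (fun s => s.1)) (fun x => x) with
  | none => ""   -- Python raises ValueError (max of empty); excluded by Pre_
  | some maxPoints =>
    let tied := (stats.items.filter (fun p => p.2.1 == maxPoints)).map (fun p => p.1)
    if tied.length == 1 then tied.getD 0 ""
    else
      let tiedSet := PySem.Set.ofList tied
      let h2h := tied.foldl (fun d team => d.insert team (pvWins stats tiedSet team))
        (PySem.Dict.empty : PySem.Dict String Int)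
      match PySem.List.max? tied (fun t => h2h.getD t 0) with
      | none => ""   -- unreachable: tied is nonempty
      | some w => w

-- ===== PORT B =====
-- helper: the per-competition update of B's flat points dict
def pvStepB (d : PySem.Dict String Int) (pr : List String × Int) : PySem.Dict String Int :=
  let home := pr.1.getD 0 ""
  let away := pr.1.getD 1 ""
  let winner := if pr.2 == 1 then home else away
  let loser := if pr.2 == 1 then away else home
  let d' := d.insert winner (d.getD winner 0 + 3)
  d'.setdefault loser 0

-- helper: the per-competition update of B's second (head-to-head rescan) pass
def pvStepH (tiedSet : List String) (d : PySem.Dict String Int) (pr : List String × Int) :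
    PySem.Dict String Int :=
  let home := pr.1.getD 0 ""
  let away := pr.1.getD 1 ""
  let winner := if pr.2 == 1 then home else away
  let loser := if pr.2 == 1 then away else home
  if PySem.Set.contains tiedSet winner && PySem.Set.contains tiedSet loser
  then d.modify winner 0 (· + 1) else d

def tournament_winner_with_tiebreakers_alt (competitions : List (List String)) (results : List Int) : String :=
  let points := (competitions.zip results).foldl pvStepB PySem.Dict.empty
  match PySem.List.max? points.values (fun x => x) with
  | none => ""   -- Python raises ValueError (max of empty); excluded by Pre_
  | some maxPoints =>
    let tied := (points.items.filter (fun p => p.2 == maxPoints)).map (fun p => p.1)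
    if tied.length == 1 then tied.getD 0 ""
    else
      let tiedSet := PySem.Set.ofList tied
      let init := tied.foldl (fun d t => d.insert t 0) (PySem.Dict.empty : PySem.Dict String Int)
      let h2h := (competitions.zip results).foldl (pvStepH tiedSet) init
      match PySem.List.max? tied (fun t => h2h.getD t 0) with
      | none => ""   -- unreachable: tied is nonempty
      | some w => w

-- ===== PRECONDITION & SPEC =====
-- Pre_ excludes exactly the inputs where the Python A raises: an empty zip of competitions
-- with results (max() of an empty sequence, ValueError) or a zipped competition whose
-- length is not 2 (unpacking raises ValueError).
def Pre_tournament_winner_with_tiebreakers (competitions : List (List String)) (results : List Int) : Prop :=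
  competitions.zip results ≠ [] ∧ ∀ pr ∈ competitions.zip results, pr.1.length = 2
instance (competitions : List (List String)) (results : List Int) : Decidable (Pre_tournament_winner_with_tiebreakers competitions results) := by unfold Pre_tournament_winner_with_tiebreakers; infer_instance
def pvWitness_tournament_winner_with_tiebreakers : List (List String) × List Int :=
  ([["a", "b"], ["b", "c"]], [1, 0])

def Spec_tournament_winner_with_tiebreakers (competitions : List (List String)) (results : List Int) (out : String) : Prop := out = tournament_winner_with_tiebreakers_alt competitions results
instance (competitions : List (List String)) (results : List Int) (out : String) : Decidable (Spec_tournament_winner_with_tiebreakers competitions results out) := by unfold Spec_tournament_winner_with_tiebreakers; infer_instance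

-- ===== CLAIM (what is proved, stated in full; the proofs are below) =====
def Claim_equal_tournament_winner_with_tiebreakers : Prop := ∀ (competitions : List (List String)) (results : List Int), Dom_tournament_winner_with_tiebreakers competitions results → Pre_tournament_winner_with_tiebreakers competitions results → Spec_tournament_winner_with_tiebreakers competitions results (tournament_winner_with_tiebreakers competitions results)

-- ===== LEMMAS AND PROOFS =====

-- winner / loser of one zipped competition (proof-side names for the lets in the steps)
def pvW (pr : List String × Int) : String := if pr.2 == 1 then pr.1.getD 0 "" else pr.1.getD 1 ""
def pvL (pr : List String × Int) : String := if pr.2 == 1 then pr.1.getD 1 "" else pr.1.getD 0 ""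

-- projection of A's stats dict onto its points component
def pvProj (S : PySem.Dict String (Int × PySem.Dict String Int)) : PySem.Dict String Int :=
  PySem.Dict.mk (S.items.map (fun p => (p.1, p.2.1)))

theorem pvProj_contains (S : PySem.Dict String (Int × PySem.Dict String Int)) (k : String) :
    (pvProj S).contains k = S.contains k := by
  simp [pvProj, PySem.Dict.contains, List.any_map, Function.comp_def]

theorem pvProj_get? (S : PySem.Dict String (Int × PySem.Dict String Int)) (k : String) :
    (pvProj S).get? k = (S.get? k).map (fun v => v.1) := by
  simp [pvProj, PySem.Dict.get?, List.find?_map, Function.comp_def]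

theorem pvProj_getD (S : PySem.Dict String (Int × PySem.Dict String Int)) (k : String) :
    (pvProj S).getD k 0 = (S.getD k (0, PySem.Dict.empty)).1 := by
  simp only [PySem.Dict.getD, pvProj_get?]
  cases S.get? k <;> simp

theorem pvProj_insert (S : PySem.Dict String (Int × PySem.Dict String Int)) (k : String)
    (v : Int × PySem.Dict String Int) : pvProj (S.insert k v) = (pvProj S).insert k v.1 := by
  by_cases h : S.contains k = true
  · simp only [PySem.Dict.insert, pvProj_contains, h, if_true]
    simp only [pvProj, List.map_map]
    apply congrArg
    apply List.map_congr_left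
    intro p _
    by_cases hp : p.1 = k <;> simp [hp]
  · simp only [PySem.Dict.insert, pvProj_contains, h]
    simp [pvProj]

theorem pvStepB_proj (S : PySem.Dict String (Int × PySem.Dict String Int)) (pr : List String × Int) :
    pvStepB (pvProj S) pr = pvProj (pvStepA S pr) := by
  show ((pvProj S).insert (pvW pr) ((pvProj S).getD (pvW pr) 0 + 3)).setdefault (pvL pr) 0
      = pvProj (pvStepA S pr)
  have hA : pvStepA S pr = (if (S.insert (pvW pr) ((S.getD (pvW pr) (0, PySem.Dict.empty)).1 + 3,
      (S.getD (pvW pr) (0, PySem.Dict.empty)).2.modify (pvL pr) 0 (· + 1))).contains (pvL pr)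
      then S.insert (pvW pr) ((S.getD (pvW pr) (0, PySem.Dict.empty)).1 + 3,
        (S.getD (pvW pr) (0, PySem.Dict.empty)).2.modify (pvL pr) 0 (· + 1))
      else (S.insert (pvW pr) ((S.getD (pvW pr) (0, PySem.Dict.empty)).1 + 3,
        (S.getD (pvW pr) (0, PySem.Dict.empty)).2.modify (pvL pr) 0 (· + 1))).insert (pvL pr)
        (0, PySem.Dict.empty)) := rfl
  rw [hA, pvProj_getD]
  have h1 := pvProj_insert S (pvW pr) ((S.getD (pvW pr) (0, PySem.Dict.empty)).1 + 3,
      (S.getD (pvW pr) (0, PySem.Dict.empty)).2.modify (pvL pr) 0 (· + 1))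
  rw [show ((S.getD (pvW pr) (0, PySem.Dict.empty)).1 + 3,
      (S.getD (pvW pr) (0, PySem.Dict.empty)).2.modify (pvL pr) 0 (· + 1)).1
      = (S.getD (pvW pr) (0, PySem.Dict.empty)).1 + 3 from rfl] at h1
  rw [← h1]
  set S' := S.insert (pvW pr) ((S.getD (pvW pr) (0, PySem.Dict.empty)).1 + 3,
      (S.getD (pvW pr) (0, PySem.Dict.empty)).2.modify (pvL pr) 0 (· + 1)) with hS'
  by_cases h : S'.contains (pvL pr) = true
  · rw [PySem.Dict.setdefault_of_contains _ _ (by rw [pvProj_contains]; exact h), if_pos h]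
  · rw [PySem.Dict.setdefault_of_not_contains _ _ (by rw [pvProj_contains]; simpa using h), if_neg h]
    exact (pvProj_insert S' (pvL pr) (0, PySem.Dict.empty)).symm

theorem pvFold_proj (l : List (List String × Int)) :
    l.foldl pvStepB PySem.Dict.empty = pvProj (l.foldl pvStepA PySem.Dict.empty) := by
  suffices H : ∀ S, l.foldl pvStepB (pvProj S) = pvProj (l.foldl pvStepA S) from H PySem.Dict.empty
  induction l with
  | nil => intro S; rfl
  | cons pr l ih => intro S; rw [List.foldl_cons, List.foldl_cons, pvStepB_proj, ih]

theorem pvStepA_eq (S : PySem.Dict String (Int × PySem.Dict String Int)) (pr : List String × Int) :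
    pvStepA S pr = (if (S.insert (pvW pr) ((S.getD (pvW pr) (0, PySem.Dict.empty)).1 + 3,
      (S.getD (pvW pr) (0, PySem.Dict.empty)).2.modify (pvL pr) 0 (· + 1))).contains (pvL pr)
      then S.insert (pvW pr) ((S.getD (pvW pr) (0, PySem.Dict.empty)).1 + 3,
        (S.getD (pvW pr) (0, PySem.Dict.empty)).2.modify (pvL pr) 0 (· + 1))
      else (S.insert (pvW pr) ((S.getD (pvW pr) (0, PySem.Dict.empty)).1 + 3,
        (S.getD (pvW pr) (0, PySem.Dict.empty)).2.modify (pvL pr) 0 (· + 1))).insert (pvL pr)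
        (0, PySem.Dict.empty)) := rfl

theorem pvStepA_getD (S : PySem.Dict String (Int × PySem.Dict String Int)) (pr : List String × Int)
    (t : String) :
    ((pvStepA S pr).getD t (0, PySem.Dict.empty)).2
      = if pvW pr = t then (S.getD t (0, PySem.Dict.empty)).2.modify (pvL pr) 0 (· + 1)
        else (S.getD t (0, PySem.Dict.empty)).2 := by
  rw [pvStepA_eq]
  set e := S.getD (pvW pr) (0, PySem.Dict.empty) with he
  set S' := S.insert (pvW pr) (e.1 + 3, e.2.modify (pvL pr) 0 (· + 1)) with hS'
  by_cases hW : pvW pr = t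
  · subst hW
    by_cases hc : S'.contains (pvL pr) = true
    · rw [if_pos hc, if_pos rfl, hS', PySem.Dict.getD_insert_self]
    · rw [if_neg hc, if_pos rfl]
      have hne : pvW pr ≠ pvL pr := by
        intro hEq
        apply hc
        rw [← hEq, hS', PySem.Dict.contains_insert]
        simp
      rw [PySem.Dict.getD_insert_of_ne _ _ _ hne, hS', PySem.Dict.getD_insert_self]
  · have hgd : S'.getD t (0, PySem.Dict.empty) = S.getD t (0, PySem.Dict.empty) := by
      rw [hS', PySem.Dict.getD_insert_of_ne _ _ _ (fun h => hW h.symm)]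
    by_cases hc : S'.contains (pvL pr) = true
    · rw [if_pos hc, if_neg hW, hgd]
    · rw [if_neg hc, if_neg hW]
      by_cases hL : pvL pr = t
      · subst hL
        rw [PySem.Dict.getD_insert_self]
        have hSc : S.contains (pvL pr) = false := by
          rw [hS', PySem.Dict.contains_insert] at hc
          simp only [Bool.or_eq_true, not_or] at hc
          simpa using hc.2
        rw [PySem.Dict.getD_of_not_contains _ _ hSc]
      · rw [PySem.Dict.getD_insert_of_ne _ _ _ (fun h => hL h.symm), hgd]

theorem pvNested (l : List (List String × Int)) (S : PySem.Dict String (Int × PySem.Dict String Int))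
    (t : String) :
    (((l.foldl pvStepA S).getD t (0, PySem.Dict.empty)).2)
      = ((l.filter (fun pr => pvW pr == t)).map pvL).foldl
          (fun d x => d.modify x 0 (· + 1)) ((S.getD t (0, PySem.Dict.empty)).2) := by
  induction l generalizing S with
  | nil => rfl
  | cons pr l ih =>
    rw [List.foldl_cons, ih, pvStepA_getD]
    by_cases h : pvW pr = t
    · have hf : List.filter (fun pr => pvW pr == t) (pr :: l)
          = pr :: List.filter (fun pr => pvW pr == t) l := by simp [h]
      rw [hf, if_pos h, List.map_cons, List.foldl_cons]
    · have hf : List.filter (fun pr => pvW pr == t) (pr :: l)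
          = List.filter (fun pr => pvW pr == t) l := by simp [h]
      rw [hf, if_neg h]

theorem pvStepA_keys_nodup (S : PySem.Dict String (Int × PySem.Dict String Int))
    (pr : List String × Int) (h : S.keys.Nodup) : (pvStepA S pr).keys.Nodup := by
  rw [pvStepA_eq]
  by_cases hc : (S.insert (pvW pr) ((S.getD (pvW pr) (0, PySem.Dict.empty)).1 + 3,
      (S.getD (pvW pr) (0, PySem.Dict.empty)).2.modify (pvL pr) 0 (· + 1))).contains (pvL pr) = true
  · rw [if_pos hc]; exact PySem.Dict.nodup_keys_insert _ _ _ h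
  · rw [if_neg hc]
    exact PySem.Dict.nodup_keys_insert _ _ _ (PySem.Dict.nodup_keys_insert _ _ _ h)

theorem pvFoldA_keys_nodup (l : List (List String × Int)) :
    (l.foldl pvStepA PySem.Dict.empty).keys.Nodup := by
  suffices H : ∀ S : PySem.Dict String (Int × PySem.Dict String Int), S.keys.Nodup →
      (l.foldl pvStepA S).keys.Nodup by
    exact H _ (by simp [PySem.Dict.keys, PySem.Dict.empty])
  induction l with
  | nil => intro S h; exact h
  | cons pr l ih => intro S h; exact ih _ (pvStepA_keys_nodup S pr h)

theorem pvSumZero (a : String) (ys : List String) (h : a ∉ ys) :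
    (ys.map (fun k => if a = k then (1 : Int) else 0)).sum = 0 := by
  induction ys with
  | nil => simp
  | cons y ys ih =>
    simp only [List.mem_cons, not_or] at h
    simp [h.1, ih h.2]

theorem pvSumIf (a : String) (ys : List String) (p : String → Bool) (hnd : ys.Nodup) :
    ((ys.filter p).map (fun k => if a = k then (1 : Int) else 0)).sum
      = if p a ∧ a ∈ ys then 1 else 0 := by
  induction ys with
  | nil => simp
  | cons y ys ih =>
    simp only [List.nodup_cons] at hnd
    by_cases hy : a = y
    · subst hy
      by_cases hp : p a = true
      · simp [hp,
          pvSumZero a (ys.filter p) (fun hm => hnd.1 (List.mem_of_mem_filter hm))]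
      · have hf : List.filter p (a :: ys) = List.filter p ys := by simp [hp]
        rw [hf, ih hnd.2]
        simp [hp, hnd.1]
    · by_cases hp : p y = true
      · have hf : List.filter p (y :: ys) = y :: List.filter p ys := by simp [hp]
        rw [hf, List.map_cons, List.sum_cons, ih hnd.2]
        simp [hy]
      · have hf : List.filter p (y :: ys) = List.filter p ys := by simp [hp]
        rw [hf, ih hnd.2]
        simp [hy]

theorem pvSumCount (xs ys : List String) (p : String → Bool) (hnd : ys.Nodup) :
    ((ys.filter p).map (fun k => (xs.count k : Int))).sum
      = (xs.countP (fun a => p a && decide (a ∈ ys)) : Int) := by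
  induction xs with
  | nil => simp
  | cons a xs ih =>
    have hstep : (fun k : String => ((a :: xs).count k : Int))
        = (fun k : String => (xs.count k : Int) + (if a = k then (1 : Int) else 0)) := by
      funext k
      by_cases h : a = k <;> simp [h]
    rw [hstep, PySem.List.sum_map_add_int, ih, pvSumIf a ys p hnd]
    by_cases hp : p a = true <;> by_cases hm : a ∈ ys <;>
      simp [hp, hm]

theorem pvMaxCongr {α κ : Type} [LT κ] [DecidableLT κ] (xs : List α) (k1 k2 : α → κ)
    (h : ∀ x ∈ xs, k1 x = k2 x) : PySem.List.max? xs k1 = PySem.List.max? xs k2 := by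
  unfold PySem.List.max?
  suffices H : ∀ acc : Option α, (∀ m, acc = some m → k1 m = k2 m) →
      xs.foldl (fun acc x => match acc with
        | none => some x
        | some m => if k1 m < k1 x then some x else some m) acc
      = xs.foldl (fun acc x => match acc with
        | none => some x
        | some m => if k2 m < k2 x then some x else some m) acc by
    exact H none (by simp)
  induction xs with
  | nil => intro acc _; rfl
  | cons x xs ih =>
    intro acc hacc
    simp only [List.foldl_cons]
    have hx : k1 x = k2 x := h x (List.mem_cons_self ..)
    have h' : ∀ y ∈ xs, k1 y = k2 y := fun y hy => h y (List.mem_cons_of_mem _ hy)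
    cases acc with
    | none =>
      exact ih h' (some x) (by intro m hm; cases hm; exact hx)
    | some m =>
      have hm : k1 m = k2 m := hacc m rfl
      rw [show (match (some m : Option α) with
          | none => some x
          | some m => if k1 m < k1 x then some x else some m)
          = if k1 m < k1 x then some x else some m from rfl]
      rw [show (match (some m : Option α) with
          | none => some x
          | some m => if k2 m < k2 x then some x else some m)
          = if k2 m < k2 x then some x else some m from rfl]
      rw [show (if k1 m < k1 x then some x else some m)
            = (if k2 m < k2 x then some x else some m) by rw [hm, hx]]
      by_cases hlt : k2 m < k2 x
      · simp only [if_pos hlt]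
        exact ih h' (some x) (by intro n hn; cases hn; exact hx)
      · simp only [if_neg hlt]
        exact ih h' (some m) (by intro n hn; cases hn; exact hm)

theorem pvProj_values (S : PySem.Dict String (Int × PySem.Dict String Int)) :
    (pvProj S).values = S.values.map (fun s => s.1) := by
  simp [pvProj, PySem.Dict.values, List.map_map, Function.comp_def]

theorem pvProj_tied (S : PySem.Dict String (Int × PySem.Dict String Int)) (m : Int) :
    ((pvProj S).items.filter (fun p => p.2 == m)).map (fun p => p.1)
      = (S.items.filter (fun p => p.2.1 == m)).map (fun p => p.1) := by
  simp [pvProj, List.filter_map, List.map_map, Function.comp_def]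

-- getD after a fresh-key insert loop (A's head_to_head_wins dict and B's initial zero dict)
theorem pvFreshFold_getD (tied : List String) (v : String → Int) (hnd : tied.Nodup)
    (t : String) (ht : t ∈ tied) :
    (tied.foldl (fun d team => d.insert team (v team))
        (PySem.Dict.empty : PySem.Dict String Int)).getD t 0 = v t := by
  have hitems := PySem.Dict.items_foldl_insert_fresh tied (fun a => a) v
    (PySem.Dict.empty : PySem.Dict String Int) (fun a _ => rfl) (by simpa using hnd)
  have hkeys : (tied.foldl (fun d team => d.insert team (v team))
      (PySem.Dict.empty : PySem.Dict String Int)).keys.Nodup := by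
    simp only [PySem.Dict.keys, hitems]
    simpa [List.map_map, Function.comp_def] using hnd
  exact PySem.Dict.getD_of_mem_items _ (by rw [hitems]; simp [ht]) hkeys 0

theorem pvH2HB_getD (tiedSet : List String) (zr : List (List String × Int))
    (init : PySem.Dict String Int) (t : String) :
    (zr.foldl (pvStepH tiedSet) init).getD t 0
      = init.getD t 0
        + (((zr.filter (fun pr => PySem.Set.contains tiedSet (pvW pr)
            && PySem.Set.contains tiedSet (pvL pr))).map pvW).count t : Int) := by
  have h1 : zr.foldl (pvStepH tiedSet) init
      = (zr.filter (fun pr => PySem.Set.contains tiedSet (pvW pr)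
          && PySem.Set.contains tiedSet (pvL pr))).foldl
          (fun d pr => d.modify (pvW pr) 0 (· + 1)) init :=
    PySem.List.foldl_if_eq_foldl_filter _ _ zr init
  have h2 : ((zr.filter (fun pr => PySem.Set.contains tiedSet (pvW pr)
        && PySem.Set.contains tiedSet (pvL pr))).map pvW).foldl
        (fun d x => d.modify x 0 (· + 1)) init
      = (zr.filter (fun pr => PySem.Set.contains tiedSet (pvW pr)
          && PySem.Set.contains tiedSet (pvL pr))).foldl
          (fun d pr => d.modify (pvW pr) 0 (· + 1)) init := by rw [List.foldl_map]
  rw [h1, ← h2]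
  exact PySem.Dict.getD_foldl_modify_add_one _ _ _

theorem pvWins_eq (zr : List (List String × Int)) (tiedSet : List String) (t : String) :
    pvWins (zr.foldl pvStepA PySem.Dict.empty) tiedSet t
      = (((zr.filter (fun pr => pvW pr == t)).map pvL).countP
          (fun a => PySem.Set.contains tiedSet a) : Int) := by
  set losers := (zr.filter (fun pr => pvW pr == t)).map pvL with hlosers
  have hN : ((zr.foldl pvStepA PySem.Dict.empty).getD t (0, PySem.Dict.empty)).2
      = PySem.Dict.counter losers := by
    rw [pvNested]; rfl
  unfold pvWins
  rw [hN, PySem.Dict.items_counter, List.filter_map, List.map_map]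
  simp only [Function.comp_def]
  rw [pvSumCount losers (PySem.Set.ofList losers) _ (PySem.Set.nodup_ofList losers)]
  congr 1
  apply List.countP_congr
  intro a ha
  simp [PySem.Set.mem_ofList, ha]

-- ===== VERDICT (by name: the statement is the Claim_ definition above) =====
theorem tournament_winner_with_tiebreakers_spec : Claim_equal_tournament_winner_with_tiebreakers := by
  intro competitions results _ _
  unfold Spec_tournament_winner_with_tiebreakers
  simp only [tournament_winner_with_tiebreakers, tournament_winner_with_tiebreakers_alt,
    pvFold_proj, pvProj_values, pvProj_tied]
  generalize PySem.List.max?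
      (((competitions.zip results).foldl pvStepA PySem.Dict.empty).values.map (fun s => s.1))
      (fun x => x) = res
  cases res with
  | none => rfl
  | some m =>
    simp only
    set zr := competitions.zip results with hzr
    set SA := zr.foldl pvStepA PySem.Dict.empty with hSA
    set tied := (SA.items.filter (fun p => p.2.1 == m)).map (fun p => p.1) with htied
    by_cases h1 : (tied.length == 1) = true
    · rw [if_pos h1, if_pos h1]
    · rw [if_neg h1, if_neg h1]
      set tiedSet := PySem.Set.ofList tied with htiedSet
      have hnd : tied.Nodup := by
        have hk : SA.keys.Nodup := pvFoldA_keys_nodup zr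
        have hsub : tied.Sublist SA.keys :=
          List.Sublist.map (fun (p : String × (Int × PySem.Dict String Int)) => p.1) List.filter_sublist
        exact hk.sublist hsub
      have hkey : ∀ t ∈ tied,
          (tied.foldl (fun d team => d.insert team (pvWins SA tiedSet team))
            (PySem.Dict.empty : PySem.Dict String Int)).getD t 0
          = ((zr.foldl (pvStepH tiedSet)
              (tied.foldl (fun d t => d.insert t 0)
                (PySem.Dict.empty : PySem.Dict String Int)))).getD t 0 := by
        intro t ht
        have hts : PySem.Set.contains tiedSet t = true := by
          rw [PySem.Set.contains_iff, htiedSet, PySem.Set.mem_ofList]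
          exact ht
        have htm : t ∈ tiedSet := (PySem.Set.contains_iff tiedSet t).mp hts
        rw [pvFreshFold_getD tied _ hnd t ht, pvH2HB_getD,
          pvFreshFold_getD tied (fun _ => 0) hnd t ht, pvWins_eq]
        rw [List.count_eq_countP, List.countP_map, List.countP_map, List.countP_filter,
          List.countP_filter]
        rw [show (0 : Int) + _ = _ from zero_add _]
        congr 1
        apply List.countP_congr
        intro pr _
        by_cases hw : pvW pr = t
        · simp [hw, htm]
        · simp [hw]
      rw [pvMaxCongr tied _ _ hkey]
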